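-- pv_equiv track=rewrite | github.com/chrisbresten/gwtda | embeddings.py | _betti_vector
-- ===== SOURCE A (Python) =====
-- def _betti_vector(dgs, epsspace, dim):
--     ints = []
--     for d in dgs:
--         if d[0] == dim:
--             ints.append(d[1])
--     bvec = []
--     for e in epsspace:
--         betti = 0
--         for i in ints:
--             betti = betti + int(_input(e, i))
--         bvec.append(betti)
--     return bvec
--
-- def _input(x, tup):
--     return x >= tup[0] and x <= tup[1]
-- ===== SOURCE B (Python) =====
-- def _count_below(xs, e, strict):
--     # number of elements of sorted list xs that are < e (strict) or <= e
--     lo, hi = 0, len(xs)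
--     while lo < hi:
--         mid = (lo + hi) // 2
--         if (xs[mid] < e) if strict else (xs[mid] <= e):
--             lo = mid + 1
--         else:
--             hi = mid
--     return lo
--
-- def _betti_vector(dgs, epsspace, dim):
--     starts = []
--     ends = []
--     for d in dgs:
--         if d[0] == dim and d[1][0] <= d[1][1]:
--             starts.append(d[1][0])
--             ends.append(d[1][1])
--     starts.sort()
--     ends.sort()
--     return [_count_below(starts, e, False) - _count_below(ends, e, True)
--             for e in epsspace]
-- ===== Notes on version B (the rewrite author's own statement) =====
-- stated objective: alternative
-- what changed: Instead of testing every interval against every epsilon, B filters the dim-matching nonempty intervals once, sorts the start and end values, and computes each count as (#starts <= e) - (#ends < e) by binary search.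
import Mathlib
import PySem

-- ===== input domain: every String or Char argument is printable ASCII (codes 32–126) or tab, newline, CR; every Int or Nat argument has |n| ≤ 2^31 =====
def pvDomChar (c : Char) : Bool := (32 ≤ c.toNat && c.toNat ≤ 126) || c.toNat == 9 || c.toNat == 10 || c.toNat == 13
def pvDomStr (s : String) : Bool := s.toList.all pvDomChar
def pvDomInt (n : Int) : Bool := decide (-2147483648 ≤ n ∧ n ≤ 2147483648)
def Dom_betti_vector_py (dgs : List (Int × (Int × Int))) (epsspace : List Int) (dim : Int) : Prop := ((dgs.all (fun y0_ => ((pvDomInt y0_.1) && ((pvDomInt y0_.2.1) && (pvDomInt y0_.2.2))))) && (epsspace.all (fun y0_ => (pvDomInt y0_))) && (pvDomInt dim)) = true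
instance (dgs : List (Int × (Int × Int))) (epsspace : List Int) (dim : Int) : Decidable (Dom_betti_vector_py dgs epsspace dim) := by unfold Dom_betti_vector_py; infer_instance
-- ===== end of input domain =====

-- B replaces the epsilon-by-interval double scan by sorting the relevant interval
-- endpoints once and answering each epsilon with two binary searches; same return
-- value everywhere (alternative algorithm, not claimed faster).

-- ===== PORT A =====
def betti_vector_py (dgs : List (Int × (Int × Int))) (epsspace : List Int) (dim : Int) : List Int :=
  let ints : List (Int × Int) :=
    dgs.foldl (fun acc d => if d.1 = dim then acc ++ [d.2] else acc) []
  epsspace.foldl (fun bvec e =>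
    bvec ++ [ints.foldl (fun betti i =>
      betti + (if e ≥ i.1 ∧ e ≤ i.2 then (1 : Int) else 0)) 0]) []

-- ===== PORT B =====
-- hand-written binary search from Source B: number of elements of the sorted list
-- xs that are < e (strict = true) or ≤ e (strict = false)
def pvCountBelow (xs : List Int) (e : Int) (strict : Bool) (lo hi : Nat) : Nat :=
  if _h : lo < hi then
    let mid := (lo + hi) / 2
    if (if strict then xs.getD mid 0 < e else xs.getD mid 0 ≤ e) then
      pvCountBelow xs e strict (mid + 1) hi
    else
      pvCountBelow xs e strict lo mid
  else lo
termination_by hi - lo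
decreasing_by all_goals omega

def betti_vector_py_alt (dgs : List (Int × (Int × Int))) (epsspace : List Int) (dim : Int) : List Int :=
  let se : List Int × List Int :=
    dgs.foldl (fun acc d =>
      if d.1 = dim ∧ d.2.1 ≤ d.2.2 then (acc.1 ++ [d.2.1], acc.2 ++ [d.2.2]) else acc)
      ([], [])
  let starts := PySem.List.sorted se.1 (fun x => x) false
  let ends := PySem.List.sorted se.2 (fun x => x) false
  epsspace.map (fun e =>
    (pvCountBelow starts e false 0 starts.length : Int)
      - (pvCountBelow ends e true 0 ends.length : Int))

-- ===== PRECONDITION & SPEC =====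
def Spec_betti_vector_py (dgs : List (Int × (Int × Int))) (epsspace : List Int) (dim : Int) (out : List Int) : Prop := out = betti_vector_py_alt dgs epsspace dim
instance (dgs : List (Int × (Int × Int))) (epsspace : List Int) (dim : Int) (out : List Int) : Decidable (Spec_betti_vector_py dgs epsspace dim out) := by unfold Spec_betti_vector_py; infer_instance

-- ===== CLAIM (what is proved, stated in full; the proofs are below) =====
def Claim_equal_betti_vector_py : Prop := ∀ (dgs : List (Int × (Int × Int))) (epsspace : List Int) (dim : Int), Dom_betti_vector_py dgs epsspace dim → Spec_betti_vector_py dgs epsspace dim (betti_vector_py dgs epsspace dim)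

-- ===== LEMMAS AND PROOFS =====

-- predicate tested by the binary search
def pvP (e : Int) (strict : Bool) : Int → Bool :=
  fun x => if strict then decide (x < e) else decide (x ≤ e)

theorem pvP_mono (e : Int) (strict : Bool) {x y : Int} (hxy : x ≤ y)
    (hy : pvP e strict y = true) : pvP e strict x = true := by
  unfold pvP at *; cases strict <;> simp_all <;> omega

-- invariant of the binary-search loop
theorem pvCountBelow_inv (xs : List Int) (e : Int) (strict : Bool)
    (hs : ∀ i j : Nat, i ≤ j → j < xs.length → xs.getD i 0 ≤ xs.getD j 0) :
    ∀ (n lo hi : Nat), hi - lo = n → hi ≤ xs.length → lo ≤ hi →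
    (∀ i, i < lo → pvP e strict (xs.getD i 0) = true) →
    (∀ i, hi ≤ i → i < xs.length → pvP e strict (xs.getD i 0) = false) →
    pvCountBelow xs e strict lo hi ≤ xs.length ∧
      ∀ i, i < xs.length → (pvP e strict (xs.getD i 0) = true ↔ i < pvCountBelow xs e strict lo hi) := by
  intro n
  induction n using Nat.strong_induction_on with
  | _ n ih =>
    intro lo hi hn hhi hle hlo hhi'
    rw [pvCountBelow]
    by_cases h : lo < hi
    · rw [dif_pos h]
      have hm1 : lo ≤ (lo + hi) / 2 := by omega
      have hm2 : (lo + hi) / 2 < hi := by omega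
      by_cases hc : (if strict then xs.getD ((lo + hi) / 2) 0 < e else xs.getD ((lo + hi) / 2) 0 ≤ e)
      · rw [if_pos hc]
        have hpm : pvP e strict (xs.getD ((lo + hi) / 2) 0) = true := by
          unfold pvP; cases strict <;> simpa using hc
        refine ih (hi - ((lo + hi) / 2 + 1)) (by omega) ((lo + hi) / 2 + 1) hi (by omega) hhi (by omega) ?_ hhi'
        intro i hi'
        by_cases hil : i < lo
        · exact hlo i hil
        · exact pvP_mono e strict (hs i ((lo + hi) / 2) (by omega) (by omega)) hpm
      · rw [if_neg hc]
        have hpm : pvP e strict (xs.getD ((lo + hi) / 2) 0) = false := by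
          unfold pvP; cases strict <;> simpa using hc
        refine ih ((lo + hi) / 2 - lo) (by omega) lo ((lo + hi) / 2) (by omega) (by omega) (by omega) hlo ?_
        intro i hmi hil
        by_cases hih : hi ≤ i
        · exact hhi' i hih hil
        · by_contra hcon
          have htrue : pvP e strict (xs.getD i 0) = true := by
            cases hh : pvP e strict (xs.getD i 0)
            · exact absurd hh hcon
            · rfl
          have hmo := pvP_mono e strict (hs ((lo + hi) / 2) i hmi hil) htrue
          rw [hpm] at hmo
          exact Bool.noConfusion hmo
    · rw [dif_neg h]
      have hlh : lo = hi := by omega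
      constructor
      · omega
      · intro i hil
        constructor
        · intro hp
          by_contra hcon
          have hf := hhi' i (by omega) hil
          rw [hp] at hf
          exact Bool.noConfusion hf
        · intro hilo; exact hlo i hilo

-- a 0/1-threshold predicate counts to its threshold
theorem countP_of_threshold (p : Int → Bool) :
    ∀ (xs : List Int) (r : Nat), r ≤ xs.length →
    (∀ i, i < xs.length → (p (xs.getD i 0) = true ↔ i < r)) →
    xs.countP p = r := by
  intro xs
  induction xs with
  | nil =>
    intro r hr _
    simp only [List.length_nil, Nat.le_zero] at hr
    simp [hr]
  | cons x t ih =>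
    intro r hr h
    have hx := h 0 (by simp)
    simp only [List.getD_cons_zero] at hx
    cases r with
    | zero =>
      have hpx : p x = false := by
        cases hh : p x
        · rfl
        · exact absurd (hx.mp hh) (by omega)
      have h0 : t.countP p = 0 := ih 0 (by omega) (fun i hi => by
        have h' := h (i + 1) (by simp only [List.length_cons]; omega)
        simp only [List.getD_cons_succ] at h'
        exact h'.trans (by omega))
      rw [List.countP_cons, hpx, h0]
      simp
    | succ s =>
      have hpx : p x = true := hx.mpr (by omega)
      have hr' : s ≤ t.length := by simp only [List.length_cons] at hr; omega
      have hs' : t.countP p = s := ih s hr' (fun i hi => by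
        have h' := h (i + 1) (by simp only [List.length_cons]; omega)
        simp only [List.getD_cons_succ] at h'
        exact h'.trans (by omega))
      rw [List.countP_cons, hpx, hs']
      simp

-- the binary search over the whole sorted list counts the predicate
theorem pvCountBelow_eq_countP (xs : List Int) (e : Int) (strict : Bool)
    (hs : xs.Pairwise (· ≤ ·)) :
    pvCountBelow xs e strict 0 xs.length = xs.countP (pvP e strict) := by
  have hmono : ∀ i j : Nat, i ≤ j → j < xs.length → xs.getD i 0 ≤ xs.getD j 0 := by
    intro i j hij hj
    rcases Nat.lt_or_ge i j with hlt | hge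
    · rw [List.getD_eq_getElem xs 0 (by omega), List.getD_eq_getElem xs 0 hj]
      exact List.pairwise_iff_getElem.mp hs i j (by omega) hj hlt
    · have : i = j := by omega
      subst this; exact le_refl _
  have := pvCountBelow_inv xs e strict hmono (xs.length - 0) 0 xs.length rfl (le_refl _)
    (by omega) (by intro i hi; omega) (by intro i h1 h2; omega)
  exact (countP_of_threshold (pvP e strict) xs _ this.1 this.2).symm

-- foldl that appends singletons is a map
theorem foldl_append_singleton {α β : Type} (g : α → β) (l : List α) (acc : List β) :
    l.foldl (fun acc e => acc ++ [g e]) acc = acc ++ l.map g := by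
  induction l generalizing acc with
  | nil => simp
  | cons x t ih => simp [List.foldl_cons, ih, List.append_assoc]

-- A's interval filter as List.filter
theorem A_ints_eq (dgs : List (Int × (Int × Int))) (dim : Int) (acc : List (Int × Int)) :
    dgs.foldl (fun acc d => if d.1 = dim then acc ++ [d.2] else acc) acc
      = acc ++ (dgs.filter (fun d => decide (d.1 = dim))).map (·.2) := by
  induction dgs generalizing acc with
  | nil => simp
  | cons x t ih =>
    simp only [List.foldl_cons, List.filter_cons]
    by_cases h : x.1 = dim
    · simp [h, ih, List.append_assoc]
    · simp [h, ih]

-- B's pair of endpoint lists as maps over a filter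
theorem B_pair_eq (dgs : List (Int × (Int × Int))) (dim : Int) (s t : List Int) :
    dgs.foldl (fun acc d =>
      if d.1 = dim ∧ d.2.1 ≤ d.2.2 then (acc.1 ++ [d.2.1], acc.2 ++ [d.2.2]) else acc)
      (s, t)
      = (s ++ (dgs.filter (fun d => decide (d.1 = dim ∧ d.2.1 ≤ d.2.2))).map (·.2.1),
         t ++ (dgs.filter (fun d => decide (d.1 = dim ∧ d.2.1 ≤ d.2.2))).map (·.2.2)) := by
  induction dgs generalizing s t with
  | nil => simp
  | cons x xs ih =>
    simp only [List.foldl_cons, List.filter_cons]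
    by_cases h : x.1 = dim ∧ x.2.1 ≤ x.2.2
    · simp [h, ih, List.append_assoc]
    · simp [h, ih]

-- A's inner 0/1 sum is a countP
theorem inner_sum_eq_countP (e : Int) (l : List (Int × Int)) (a : Int) :
    l.foldl (fun betti i => betti + (if e ≥ i.1 ∧ e ≤ i.2 then (1 : Int) else 0)) a
      = a + (l.countP (fun i => decide (i.1 ≤ e ∧ e ≤ i.2)) : Int) := by
  induction l generalizing a with
  | nil => simp
  | cons x t ih =>
    simp only [List.foldl_cons, List.countP_cons, ih]
    by_cases h : x.1 ≤ e ∧ e ≤ x.2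
    · simp [h]
      ring
    · simp [h]

-- containment count over proper intervals splits into two endpoint counts
theorem countP_contain_split (e : Int) :
    ∀ (K : List (Int × Int)), (∀ i ∈ K, i.1 ≤ i.2) →
    (K.countP (fun i => decide (i.1 ≤ e ∧ e ≤ i.2)) : Int)
      = (K.countP (fun i => decide (i.1 ≤ e)) : Int) - (K.countP (fun i => decide (i.2 < e)) : Int) := by
  intro K
  induction K with
  | nil => simp
  | cons x t ih =>
    intro h
    have hx : x.1 ≤ x.2 := h x (by simp)
    have ht := ih (fun i hi => h i (List.mem_cons_of_mem x hi))
    simp only [List.countP_cons, decide_eq_true_eq]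
    push_cast
    split_ifs with h1 h2 h3 <;> omega

-- dropping the improper intervals does not change the containment count
theorem countP_contain_filter (e : Int) (l : List (Int × Int)) :
    l.countP (fun i => decide (i.1 ≤ e ∧ e ≤ i.2))
      = (l.filter (fun i => decide (i.1 ≤ i.2))).countP (fun i => decide (i.1 ≤ e ∧ e ≤ i.2)) := by
  rw [List.countP_filter]
  apply List.countP_congr
  intro a _
  by_cases h : a.1 ≤ e ∧ e ≤ a.2
  · have : a.1 ≤ a.2 := le_trans h.1 h.2
    simp [h, this]
  · simp [h]

-- the two filters coincide: filter by (dim ∧ proper) = filter by dim then proper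
theorem filter_split_aux (dgs : List (Int × (Int × Int))) (dim : Int) :
    (dgs.filter (fun d => decide (d.1 = dim) && decide (d.2.1 ≤ d.2.2))).map (·.2)
      = ((dgs.filter (fun d => decide (d.1 = dim))).map (·.2)).filter (fun i => decide (i.1 ≤ i.2)) := by
  induction dgs with
  | nil => simp
  | cons x t ih =>
    simp only [List.filter_cons]
    by_cases h1 : x.1 = dim <;> by_cases h2 : x.2.1 ≤ x.2.2 <;>
      simp [h1, h2, ih]

theorem filter_split (dgs : List (Int × (Int × Int))) (dim : Int) :
    (dgs.filter (fun d => decide (d.1 = dim ∧ d.2.1 ≤ d.2.2))).map (·.2)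
      = ((dgs.filter (fun d => decide (d.1 = dim))).map (·.2)).filter (fun i => decide (i.1 ≤ i.2)) := by
  have hpred : (fun d : Int × (Int × Int) => decide (d.1 = dim ∧ d.2.1 ≤ d.2.2))
      = (fun d => decide (d.1 = dim) && decide (d.2.1 ≤ d.2.2)) := by
    funext d; simp [Bool.decide_and]
  rw [hpred]
  exact filter_split_aux dgs dim

-- ===== VERDICT (by name: the statement is the Claim_ definition above) =====
theorem betti_vector_py_spec : Claim_equal_betti_vector_py := by
  intro dgs epsspace dim _
  unfold Spec_betti_vector_py betti_vector_py betti_vector_py_alt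
  simp only []
  rw [A_ints_eq dgs dim [], B_pair_eq dgs dim [] []]
  simp only [List.nil_append]
  rw [foldl_append_singleton, List.nil_append]
  apply List.map_congr_left
  intro e _
  -- name the pieces
  set I : List (Int × Int) := (dgs.filter (fun d => decide (d.1 = dim))).map (·.2) with hI
  set K : List (Int × Int) :=
    (dgs.filter (fun d => decide (d.1 = dim ∧ d.2.1 ≤ d.2.2))).map (·.2) with hK
  have hKI : K = I.filter (fun i => decide (i.1 ≤ i.2)) := filter_split dgs dim
  have hKs : ∀ i ∈ K, i.1 ≤ i.2 := by
    intro i hi; rw [hKI] at hi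
    have := List.of_mem_filter hi
    simpa using this
  -- starts/ends lists of B
  have hstarts : (dgs.filter (fun d => decide (d.1 = dim ∧ d.2.1 ≤ d.2.2))).map (·.2.1)
      = K.map (·.1) := by rw [hK, List.map_map]; rfl
  have hends : (dgs.filter (fun d => decide (d.1 = dim ∧ d.2.1 ≤ d.2.2))).map (·.2.2)
      = K.map (·.2) := by rw [hK, List.map_map]; rfl
  rw [hstarts, hends]
  -- binary searches count the predicates on the sorted lists
  have hs1 : (PySem.List.sorted (K.map (·.1)) (fun x => x) false).Pairwise (· ≤ ·) := by
    have := PySem.List.sorted_pairwise (K.map (·.1)) (fun x => x)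
    simpa using this
  have hs2 : (PySem.List.sorted (K.map (·.2)) (fun x => x) false).Pairwise (· ≤ ·) := by
    have := PySem.List.sorted_pairwise (K.map (·.2)) (fun x => x)
    simpa using this
  rw [pvCountBelow_eq_countP _ e false hs1, pvCountBelow_eq_countP _ e true hs2]
  rw [(PySem.List.sorted_perm (K.map (·.1)) (fun x => x) false).countP_eq,
      (PySem.List.sorted_perm (K.map (·.2)) (fun x => x) false).countP_eq]
  -- A's entry
  rw [inner_sum_eq_countP, zero_add]
  rw [countP_contain_filter e I, ← hKI]
  rw [countP_contain_split e K hKs]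
  simp [List.countP_map, pvP, Function.comp_def]
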